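-- pv_equiv track=rewrite | github.com/ShinhyeongPark/Algorithm | Level1/weekly4.py | solution
-- ===== SOURCE A (Python) =====
-- def solution(table, languages, preference):
--     score = []  # 직군별 점수를 저장할 리스트
--     answer = []  # 최고 점수인 직군을 저장할 리스트
--
--     # 직군 단위로 통계를 내기 위한 반복
--     for t in table:
--         tmpScore = 0  # 각 직군별 계산을 위한 변수
--         for i, l in enumerate(languages):  # 0,python/1, C++/2, SQL
--             if l in t.split()[1:]:  # t의 0번째 값은 직군이므로 계산에 필요없음
--                 tmpScore += preference[i] * (5 - t.split().index(l) + 1)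
--
--         score.append(tmpScore) #저장
--
--     maxScore = max(score)
--     for i, s in enumerate(score):
--         if s == maxScore:
--             answer.append(table[i].split()[0])
--
--     answer.sort()
--     return answer[0]
-- ===== SOURCE B (Python) =====
-- def solution(table, languages, preference):
--     # one pass: track running best (score, name); tie-break = lexicographically smaller name
--     best_name = None
--     best_score = None
--     for t in table:
--         tokens = t.split()
--         score = 0
--         for i, l in enumerate(languages):
--             if l in tokens[1:]:
--                 score += preference[i] * (6 - tokens.index(l))
--         name = tokens[0]
--         if best_score is None or score > best_score or (score == best_score and name < best_name):
--             best_score, best_name = score, name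
--     return best_name
-- ===== Notes on version B (the rewrite author's own statement) =====
-- stated objective: simpler
-- what changed: B replaces A's score list + max() + tie-collection loop + sort() by a single pass over table that keeps the running best (score, name), breaking score ties by the lexicographically smaller category name; per-row tokens are split once instead of repeatedly.
-- outside the precondition, e.g. on solution(['a x', '  '], ['x'], [1]): A returns 'a', B raises IndexError
import Mathlib
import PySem

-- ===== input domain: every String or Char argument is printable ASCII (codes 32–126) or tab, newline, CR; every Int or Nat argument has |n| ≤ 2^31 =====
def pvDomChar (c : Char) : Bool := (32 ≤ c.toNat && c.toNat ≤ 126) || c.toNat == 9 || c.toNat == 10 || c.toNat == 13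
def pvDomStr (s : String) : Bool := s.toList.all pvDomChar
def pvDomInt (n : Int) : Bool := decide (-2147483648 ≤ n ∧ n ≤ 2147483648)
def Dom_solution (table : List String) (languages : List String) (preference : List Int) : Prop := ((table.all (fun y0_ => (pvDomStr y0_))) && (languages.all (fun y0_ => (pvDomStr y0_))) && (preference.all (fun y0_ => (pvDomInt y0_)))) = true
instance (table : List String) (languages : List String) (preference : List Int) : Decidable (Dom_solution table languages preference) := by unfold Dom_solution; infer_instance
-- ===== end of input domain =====

-- B replaces A's score list + max + tie-collection + sort by a single pass keeping the running
-- best (score, name) with tie-break on the smaller name (objective: simpler).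

-- ===== PORT A =====
def solution (table : List String) (languages : List String) (preference : List Int) : String :=
  let score := table.foldl (fun sc t =>
    let tmp : Int := (PySem.List.enumerate languages).foldl (fun tmp il =>
      if il.2 ∈ PySem.List.slice (PySem.Str.split₀ t) (some 1) none then
        tmp + (PySem.List.pyGet? preference il.1).getD 0 *
          (5 - (((PySem.List.index? (PySem.Str.split₀ t) il.2).getD 0 : Nat) : Int) + 1)
      else tmp) 0
    sc ++ [tmp]) []
  let maxScore : Int := (PySem.List.max? score (fun x => x)).getD 0
  let answer := (PySem.List.enumerate score).foldl (fun ans is =>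
    if is.2 == maxScore then
      ans ++ [(PySem.List.pyGet? (PySem.Str.split₀ ((PySem.List.pyGet? table is.1).getD "")) 0).getD ""]
    else ans) []
  let answer₂ := PySem.List.sorted answer (fun x => x) false
  (PySem.List.pyGet? answer₂ 0).getD ""

-- ===== PORT B =====
def solution_alt (table : List String) (languages : List String) (preference : List Int) : String :=
  let best := table.foldl (fun (best : Option (Int × String)) t =>
    let tokens := PySem.Str.split₀ t
    let score : Int := (PySem.List.enumerate languages).foldl (fun s il =>
      if il.2 ∈ PySem.List.slice tokens (some 1) none then
        s + (PySem.List.pyGet? preference il.1).getD 0 *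
          (6 - (((PySem.List.index? tokens il.2).getD 0 : Nat) : Int))
      else s) 0
    let name := (PySem.List.pyGet? tokens 0).getD ""
    match best with
    | none => some (score, name)
    | some (bs, bn) =>
      if score > bs ∨ (score = bs ∧ name < bn) then some (score, name) else some (bs, bn)) none
  match best with
  | none => ""
  | some (_, n) => n

-- ===== PRECONDITION & SPEC =====
-- Pre_ excludes: the empty table (A raises via max([])); rows with no whitespace-separated token,
-- on which Python A raises IndexError whenever such a row attains the maximal score and B always
-- raises; and inputs where some listed language occurs in a row past preference's length, on which
-- A (and B) raise IndexError.
def Pre_solution (table : List String) (languages : List String) (preference : List Int) : Prop :=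
  table ≠ [] ∧ (∀ t ∈ table, PySem.Str.split₀ t ≠ []) ∧
  (∀ t ∈ table, ∀ p ∈ PySem.List.enumerate languages,
    p.2 ∈ PySem.List.slice (PySem.Str.split₀ t) (some 1) none → p.1 < (preference.length : Int))
instance (table : List String) (languages : List String) (preference : List Int) : Decidable (Pre_solution table languages preference) := by unfold Pre_solution; infer_instance
def pvWitness_solution : List String × List String × List Int := (["job py sql", "dev py"], ["py", "sql"], [3, 1])
def Spec_solution (table : List String) (languages : List String) (preference : List Int) (out : String) : Prop := out = solution_alt table languages preference
instance (table : List String) (languages : List String) (preference : List Int) (out : String) : Decidable (Spec_solution table languages preference out) := by unfold Spec_solution; infer_instance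

-- ===== CLAIM (what is proved, stated in full; the proofs are below) =====
def Claim_equal_solution : Prop := ∀ (table : List String) (languages : List String) (preference : List Int), Dom_solution table languages preference → Pre_solution table languages preference → Spec_solution table languages preference (solution table languages preference)

-- ===== LEMMAS AND PROOFS =====

-- per-row score (B's form) and row name
def rowScore (languages : List String) (preference : List Int) (t : String) : Int :=
  (PySem.List.enumerate languages).foldl (fun s il =>
    if il.2 ∈ PySem.List.slice (PySem.Str.split₀ t) (some 1) none then
      s + (PySem.List.pyGet? preference il.1).getD 0 *
        (6 - (((PySem.List.index? (PySem.Str.split₀ t) il.2).getD 0 : Nat) : Int))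
    else s) 0

def rowName (t : String) : String := (PySem.List.pyGet? (PySem.Str.split₀ t) 0).getD ""

def step (b : Option (Int × String)) (r : Int × String) : Option (Int × String) :=
  match b with
  | none => some r
  | some (bs, bn) => if r.1 > bs ∨ (r.1 = bs ∧ r.2 < bn) then some r else some (bs, bn)

theorem inner_eq (languages : List String) (preference : List Int) (t : String) :
    (PySem.List.enumerate languages).foldl (fun tmp il =>
      if il.2 ∈ PySem.List.slice (PySem.Str.split₀ t) (some 1) none then
        tmp + (PySem.List.pyGet? preference il.1).getD 0 *
          (5 - (((PySem.List.index? (PySem.Str.split₀ t) il.2).getD 0 : Nat) : Int) + 1)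
      else tmp) 0 = rowScore languages preference t := by
  unfold rowScore
  congr 1
  funext tmp il
  by_cases h : il.2 ∈ PySem.List.slice (PySem.Str.split₀ t) (some 1) none
  · rw [if_pos h, if_pos h]; ring
  · rw [if_neg h, if_neg h]

theorem foldl_snoc_map {α β : Type} (g : α → β) (l : List α) :
    ∀ acc : List β, l.foldl (fun a x => a ++ [g x]) acc = acc ++ l.map g := by
  induction l with
  | nil => simp
  | cons x xs ih => intro acc; simp [ih]

theorem B_eq (table : List String) (languages : List String) (preference : List Int) :
    solution_alt table languages preference =
      match (table.map (fun t => (rowScore languages preference t, rowName t))).foldl step none with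
      | none => ""
      | some (_, n) => n := by
  unfold solution_alt
  rw [List.foldl_map]
  rfl

theorem step_spec (rows : List (Int × String)) (hne : rows ≠ []) :
    ∃ M m, rows.foldl step none = some (M, m) ∧
      (∀ r ∈ rows, r.1 ≤ M) ∧ (M, m) ∈ rows ∧ (∀ r ∈ rows, r.1 = M → m ≤ r.2) := by
  induction rows using List.reverseRecOn with
  | nil => exact absurd rfl hne
  | append_singleton l r ih =>
    rw [List.foldl_append]
    rcases eq_or_ne l [] with hl | hl
    · subst hl
      refine ⟨r.1, r.2, rfl, ?_, ?_, ?_⟩ <;> simp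
    · obtain ⟨M, m, hfold, hub, hmem, hmin⟩ := ih hl
      rw [hfold]
      show ∃ M' m', step (some (M, m)) r = some (M', m') ∧ _
      simp only [step]
      by_cases h : r.1 > M ∨ (r.1 = M ∧ r.2 < m)
      · rw [if_pos h]
        refine ⟨r.1, r.2, rfl, ?_, by simp, ?_⟩
        · intro r' hr'
          rcases List.mem_append.1 hr' with hr' | hr'
          · rcases h with h | h
            · exact le_of_lt (lt_of_le_of_lt (hub r' hr') h)
            · exact h.1 ▸ hub r' hr'
          · simp at hr'; subst hr'; exact le_refl _
        · intro r' hr' heq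
          rcases List.mem_append.1 hr' with hr' | hr'
          · rcases h with h | h
            · exact absurd (heq ▸ hub r' hr') (not_le.2 h)
            · exact le_of_lt (lt_of_lt_of_le h.2 (hmin r' hr' (heq.trans h.1)))
          · simp at hr'; subst hr'; exact le_refl _
      · rw [if_neg h]
        push Not at h
        refine ⟨M, m, rfl, ?_, List.mem_append_left _ hmem, ?_⟩
        · intro r' hr'
          rcases List.mem_append.1 hr' with hr' | hr'
          · exact hub r' hr'
          · simp at hr'; subst hr'; exact h.1
        · intro r' hr' heq
          rcases List.mem_append.1 hr' with hr' | hr'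
          · exact hmin r' hr' heq
          · simp at hr'; subst hr'; exact h.2 heq

theorem answer_eq (maxS : Int) (f : String → Int) :
    ∀ (post pre : List String) (acc : List String),
      (PySem.List.enumerate (post.map f) (pre.length : Int)).foldl (fun ans is =>
        if is.2 == maxS then
          ans ++ [(PySem.List.pyGet? (PySem.Str.split₀ ((PySem.List.pyGet? (pre ++ post) is.1).getD "")) 0).getD ""]
        else ans) acc
      = acc ++ (post.filter (fun t => f t == maxS)).map rowName := by
  intro post
  induction post with
  | nil => intro pre acc; simp [PySem.List.enumerate_nil]
  | cons x xs ih =>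
    intro pre acc
    have hx : PySem.List.pyGet? (pre ++ x :: xs) ((pre.length : Int)) = some x :=
      PySem.List.pyGet?_append_length pre xs x
    have hlist : pre ++ x :: xs = (pre ++ [x]) ++ xs := by simp
    have hstart : (pre.length : Int) + 1 = (((pre ++ [x]).length : Nat) : Int) := by
      simp [List.length_append]
    simp only [List.map_cons, PySem.List.enumerate_cons, List.foldl_cons]
    rw [hx]
    rw [hlist, hstart]
    rw [ih (pre ++ [x])]
    simp only [List.filter_cons]
    cases hfx : (f x == maxS)
    · simp
    · simp [rowName]

-- ===== VERDICT (by name: the statement is the Claim_ definition above) =====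
theorem solution_spec : Claim_equal_solution := by
  intro table languages preference _hdom hpre
  obtain ⟨hne, -, -⟩ := hpre
  unfold Spec_solution
  rw [B_eq]
  obtain ⟨M, m, hfold, hub, hmem, hmin⟩ :=
    step_spec (table.map (fun t => (rowScore languages preference t, rowName t)))
      (by simpa using hne)
  rw [hfold]
  unfold solution
  simp only [inner_eq]
  rw [foldl_snoc_map (rowScore languages preference) table []]
  simp only [List.nil_append]
  obtain ⟨t₀, ht₀, hpair₀⟩ := List.mem_map.1 hmem
  have hMmem : M ∈ table.map (rowScore languages preference) :=
    List.mem_map.2 ⟨t₀, ht₀, (Prod.mk.injEq _ _ _ _ ▸ hpair₀).1⟩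
  have hub' : ∀ y ∈ table.map (rowScore languages preference), y ≤ M := by
    intro y hy
    obtain ⟨t, ht, hyt⟩ := List.mem_map.1 hy
    exact hyt ▸ hub _ (List.mem_map.2 ⟨t, ht, rfl⟩)
  have hmax : PySem.List.max? (table.map (rowScore languages preference)) (fun x => x) = some M := by
    cases hv : PySem.List.max? (table.map (rowScore languages preference)) (fun x => x) with
    | none =>
      exact absurd ((PySem.List.max?_eq_none_iff _ _).1 hv) (by simpa using hne)
    | some v =>
      have h1 : v ≤ M := hub' v (PySem.List.max?_mem hv)
      have h2 : M ≤ v := PySem.List.max?_isMax hv M hMmem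
      rw [le_antisymm h1 h2]
  simp only [hmax, Option.getD_some]
  have hans := answer_eq M (rowScore languages preference) table [] []
  simp only [List.nil_append, List.length_nil, Nat.cast_zero] at hans
  rw [hans]
  have hmL : m ∈ (table.filter (fun t => rowScore languages preference t == M)).map rowName := by
    refine List.mem_map.2 ⟨t₀, List.mem_filter.2 ⟨ht₀, ?_⟩, (Prod.mk.injEq _ _ _ _ ▸ hpair₀).2⟩
    simp [(Prod.mk.injEq _ _ _ _ ▸ hpair₀).1]
  have hsne : PySem.List.sorted ((table.filter (fun t => rowScore languages preference t == M)).map rowName) (fun x => x) false ≠ [] := by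
    rw [Ne, PySem.List.sorted_eq_nil_iff]
    exact List.ne_nil_of_mem hmL
  obtain ⟨h0, tl, hS⟩ := List.exists_cons_of_ne_nil hsne
  rw [hS]
  simp only [PySem.List.pyGet?_zero_cons, Option.getD_some]
  have h0mem : h0 ∈ (table.filter (fun t => rowScore languages preference t == M)).map rowName :=
    (PySem.List.mem_sorted _ _ _ _).1 (hS ▸ List.mem_cons_self)
  obtain ⟨t₁, ht₁, hname₁⟩ := List.mem_map.1 h0mem
  have ht₁' := List.mem_filter.1 ht₁
  have hm_le : m ≤ h0 := by
    refine hname₁ ▸ hmin (rowScore languages preference t₁, rowName t₁)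
      (List.mem_map.2 ⟨t₁, ht₁'.1, rfl⟩) ?_
    simpa using ht₁'.2
  have h0_le : h0 ≤ m := PySem.List.key_head_sorted_le _ _ hS m hmL
  exact le_antisymm h0_le hm_le
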